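-- pv_equiv track=rewrite | github.com/RodrigoAlmeidadeOliveira/SPM-TO | app/services/modulos_service.py | _interpretar_perfil_sensorial_geral
-- ===== SOURCE A (Python) =====
-- def _interpretar_perfil_sensorial_geral(quadrantes):
--     """
--     Gera interpretação geral baseada nos padrões dos quadrantes
--
--     Args:
--         quadrantes: Dict com escores dos quadrantes
--
--     Returns:
--         str: Texto interpretativo geral
--     """
--     interpretacao = []
--
--     # Identificar quadrantes predominantes (escore alto)
--     quadrantes_altos = []
--     quadrantes_baixos = []
--
--     for quadrante, dados in quadrantes.items():
--         if 'classificacao' in dados: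
--             nivel = dados['classificacao'].get('nivel', '')
--             if nivel in ['MAIS', 'MUITO_MAIS']:
--                 quadrantes_altos.append(quadrante)
--             elif nivel in ['MENOS', 'MUITO_MENOS']:
--                 quadrantes_baixos.append(quadrante)
--
--     if 'EXPLORACAO' in quadrantes_altos:
--         interpretacao.append(
--             "A criança demonstra um padrão de BUSCA SENSORIAL elevado, procurando ativamente "
--             "por experiências sensoriais no ambiente."
--         )
--
--     if 'ESQUIVA' in quadrantes_altos:
--         interpretacao.append(
--             "A criança apresenta padrão de ESQUIVA SENSORIAL, evitando ou se afastando de "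
--             "certos estímulos sensoriais que podem ser desconfortáveis."
--         )
--
--     if 'SENSIBILIDADE' in quadrantes_altos:
--         interpretacao.append(
--             "A criança demonstra SENSIBILIDADE SENSORIAL aumentada, percebendo estímulos "
--             "que outras crianças da mesma idade podem não notar."
--         )
--
--     if 'OBSERVACAO' in quadrantes_altos:
--         interpretacao.append(
--             "A criança apresenta padrão de BAIXO REGISTRO SENSORIAL, podendo não perceber "
--             "ou responder a estímulos sensoriais do ambiente."
--         )
--
--     if not interpretacao:
--         interpretacao.append(
--             "A criança apresenta padrões de processamento sensorial dentro da faixa típica "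
--             "para a maioria dos quadrantes avaliados."
--         )
--
--     return " ".join(interpretacao)
-- ===== SOURCE B (Python) =====
-- _TEXTOS_QUADRANTES = [
--     ("EXPLORACAO",
--      "A criança demonstra um padrão de BUSCA SENSORIAL elevado, procurando ativamente "
--      "por experiências sensoriais no ambiente."),
--     ("ESQUIVA",
--      "A criança apresenta padrão de ESQUIVA SENSORIAL, evitando ou se afastando de "
--      "certos estímulos sensoriais que podem ser desconfortáveis."),
--     ("SENSIBILIDADE",
--      "A criança demonstra SENSIBILIDADE SENSORIAL aumentada, percebendo estímulos "
--      "que outras crianças da mesma idade podem não notar."),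
--     ("OBSERVACAO",
--      "A criança apresenta padrão de BAIXO REGISTRO SENSORIAL, podendo não perceber "
--      "ou responder a estímulos sensoriais do ambiente."),
-- ]
--
-- _TEXTO_TIPICO = (
--     "A criança apresenta padrões de processamento sensorial dentro da faixa típica "
--     "para a maioria dos quadrantes avaliados."
-- )
--
--
-- def _interpretar_perfil_sensorial_geral(quadrantes):
--     interpretacao = []
--     for chave, texto in _TEXTOS_QUADRANTES:
--         dados = quadrantes.get(chave)
--         if dados is not None and 'classificacao' in dados \
--                 and dados['classificacao'].get('nivel', '') in ('MAIS', 'MUITO_MAIS'):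
--             interpretacao.append(texto)
--     if not interpretacao:
--         interpretacao.append(_TEXTO_TIPICO)
--     return " ".join(interpretacao)
-- ===== Notes on version B (the rewrite author's own statement) =====
-- stated objective: simpler
-- what changed: B drops A's pre-scan that builds quadrantes_altos/quadrantes_baixos index lists and replaces the four hard-coded membership branches with one data-driven loop over a constant (quadrant, text) table, looking each quadrant up directly in the dict.
import Mathlib
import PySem

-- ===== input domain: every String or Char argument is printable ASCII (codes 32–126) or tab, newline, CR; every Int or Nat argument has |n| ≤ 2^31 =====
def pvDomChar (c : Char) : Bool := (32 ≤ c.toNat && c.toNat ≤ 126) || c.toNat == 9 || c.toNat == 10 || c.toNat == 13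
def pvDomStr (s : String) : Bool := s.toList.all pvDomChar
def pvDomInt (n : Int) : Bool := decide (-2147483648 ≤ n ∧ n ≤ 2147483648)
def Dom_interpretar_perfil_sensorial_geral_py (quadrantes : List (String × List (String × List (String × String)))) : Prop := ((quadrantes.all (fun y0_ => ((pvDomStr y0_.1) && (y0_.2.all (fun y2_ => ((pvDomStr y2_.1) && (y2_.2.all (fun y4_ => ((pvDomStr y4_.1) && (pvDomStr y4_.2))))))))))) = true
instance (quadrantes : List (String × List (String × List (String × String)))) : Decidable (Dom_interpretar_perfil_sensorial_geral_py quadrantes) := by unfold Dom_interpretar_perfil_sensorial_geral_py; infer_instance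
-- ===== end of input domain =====

-- B replaces A's pre-scan that indexes high/low quadrants with one data-driven loop over a
-- constant (key, text) table, looking each key up directly; objective: simpler.

def pvTextoExploracao : String :=
  "A criança demonstra um padrão de BUSCA SENSORIAL elevado, procurando ativamente por experiências sensoriais no ambiente."
def pvTextoEsquiva : String :=
  "A criança apresenta padrão de ESQUIVA SENSORIAL, evitando ou se afastando de certos estímulos sensoriais que podem ser desconfortáveis."
def pvTextoSensibilidade : String :=
  "A criança demonstra SENSIBILIDADE SENSORIAL aumentada, percebendo estímulos que outras crianças da mesma idade podem não notar."
def pvTextoObservacao : String :=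
  "A criança apresenta padrão de BAIXO REGISTRO SENSORIAL, podendo não perceber ou responder a estímulos sensoriais do ambiente."
def pvTextoTipico : String :=
  "A criança apresenta padrões de processamento sensorial dentro da faixa típica para a maioria dos quadrantes avaliados."

-- ===== PORT A =====
def interpretar_perfil_sensorial_geral_py (quadrantes : List (String × List (String × List (String × String)))) : String :=
  let interpretacao : List String := []
  -- for quadrante, dados in quadrantes.items(): build quadrantes_altos / quadrantes_baixos
  let res := quadrantes.foldl (fun (acc : List String × List String) p =>
      let dados := PySem.Dict.mk p.2
      match dados.get? "classificacao" with       -- 'classificacao' in dados + dados['classificacao']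
      | some cls =>
        let nivel := (PySem.Dict.mk cls).getD "nivel" ""
        if nivel = "MAIS" ∨ nivel = "MUITO_MAIS" then (acc.1 ++ [p.1], acc.2)
        else if nivel = "MENOS" ∨ nivel = "MUITO_MENOS" then (acc.1, acc.2 ++ [p.1])
        else acc
      | none => acc) ([], [])
  let quadrantes_altos := res.1
  let interpretacao := if quadrantes_altos.contains "EXPLORACAO" then interpretacao ++ [pvTextoExploracao] else interpretacao
  let interpretacao := if quadrantes_altos.contains "ESQUIVA" then interpretacao ++ [pvTextoEsquiva] else interpretacao
  let interpretacao := if quadrantes_altos.contains "SENSIBILIDADE" then interpretacao ++ [pvTextoSensibilidade] else interpretacao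
  let interpretacao := if quadrantes_altos.contains "OBSERVACAO" then interpretacao ++ [pvTextoObservacao] else interpretacao
  let interpretacao := if interpretacao = [] then [pvTextoTipico] else interpretacao
  PySem.Str.join " " interpretacao

-- ===== PORT B =====
def pvTabela : List (String × String) :=
  [("EXPLORACAO", pvTextoExploracao), ("ESQUIVA", pvTextoEsquiva),
   ("SENSIBILIDADE", pvTextoSensibilidade), ("OBSERVACAO", pvTextoObservacao)]

def interpretar_perfil_sensorial_geral_py_alt (quadrantes : List (String × List (String × List (String × String)))) : String :=
  let d := PySem.Dict.mk quadrantes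
  let interpretacao := pvTabela.foldl (fun (acc : List String) kt =>
      match d.get? kt.1 with                      -- dados = quadrantes.get(chave); skip if None
      | some dadosL =>
        let dados := PySem.Dict.mk dadosL
        match dados.get? "classificacao" with
        | some cls =>
          if (PySem.Dict.mk cls).getD "nivel" "" ∈ (["MAIS", "MUITO_MAIS"] : List String)
          then acc ++ [kt.2] else acc
        | none => acc
      | none => acc) []
  let interpretacao := if interpretacao = [] then [pvTextoTipico] else interpretacao
  PySem.Str.join " " interpretacao

-- ===== PRECONDITION & SPEC =====
-- Pre_ excludes association lists with duplicate top-level quadrant keys: such a list cannot arise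
-- from the Python dict argument, and the two ports' first-match vs scan-all readings of it are both accidental.
def Pre_interpretar_perfil_sensorial_geral_py (quadrantes : List (String × List (String × List (String × String)))) : Prop :=
  (quadrantes.map Prod.fst).Nodup
instance (quadrantes : List (String × List (String × List (String × String)))) : Decidable (Pre_interpretar_perfil_sensorial_geral_py quadrantes) := by unfold Pre_interpretar_perfil_sensorial_geral_py; infer_instance

def pvWitness_interpretar_perfil_sensorial_geral_py : (List (String × List (String × List (String × String)))) :=
  [("ESQUIVA", [("classificacao", [("nivel", "MAIS")])])]

def Spec_interpretar_perfil_sensorial_geral_py (quadrantes : List (String × List (String × List (String × String)))) (out : String) : Prop := out = interpretar_perfil_sensorial_geral_py_alt quadrantes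
instance (quadrantes : List (String × List (String × List (String × String)))) (out : String) : Decidable (Spec_interpretar_perfil_sensorial_geral_py quadrantes out) := by unfold Spec_interpretar_perfil_sensorial_geral_py; infer_instance

-- ===== CLAIM (what is proved, stated in full; the proofs are below) =====
def Claim_equal_interpretar_perfil_sensorial_geral_py : Prop := ∀ (quadrantes : List (String × List (String × List (String × String)))), Dom_interpretar_perfil_sensorial_geral_py quadrantes → Pre_interpretar_perfil_sensorial_geral_py quadrantes → Spec_interpretar_perfil_sensorial_geral_py quadrantes (interpretar_perfil_sensorial_geral_py quadrantes)

-- ===== LEMMAS AND PROOFS =====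

-- proof-side abbreviation: dados counts as "high" (nivel MAIS / MUITO_MAIS)
def pvAlto (dadosL : List (String × List (String × String))) : Bool :=
  match (PySem.Dict.mk dadosL).get? "classificacao" with
  | some cls =>
    decide ((PySem.Dict.mk cls).getD "nivel" "" = "MAIS") ||
      decide ((PySem.Dict.mk cls).getD "nivel" "" = "MUITO_MAIS")
  | none => false

-- A's index-building fold: the high list it returns is the filtered key list
theorem pvFoldA_fst (l : List (String × List (String × List (String × String))))
    (acc : List String × List String) :
    (l.foldl (fun (acc : List String × List String) p =>
      let dados := PySem.Dict.mk p.2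
      match dados.get? "classificacao" with
      | some cls =>
        let nivel := (PySem.Dict.mk cls).getD "nivel" ""
        if nivel = "MAIS" ∨ nivel = "MUITO_MAIS" then (acc.1 ++ [p.1], acc.2)
        else if nivel = "MENOS" ∨ nivel = "MUITO_MENOS" then (acc.1, acc.2 ++ [p.1])
        else acc
      | none => acc) acc).1
    = acc.1 ++ (l.filter (fun p => pvAlto p.2)).map Prod.fst := by
  induction l generalizing acc with
  | nil => simp
  | cons p t ih =>
    simp only [List.foldl_cons, List.filter_cons]
    cases h : (PySem.Dict.mk p.2).get? "classificacao" with
    | none => simp [h, ih, pvAlto]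
    | some cls =>
      by_cases h1 : (PySem.Dict.mk cls).getD "nivel" "" = "MAIS" ∨ (PySem.Dict.mk cls).getD "nivel" "" = "MUITO_MAIS"
      · simp [h, h1, ih, pvAlto]
      · by_cases h2 : (PySem.Dict.mk cls).getD "nivel" "" = "MENOS" ∨ (PySem.Dict.mk cls).getD "nivel" "" = "MUITO_MENOS"
        · simp [h, h1, h2, ih, pvAlto]
        · simp [h, h1, h2, ih, pvAlto]

-- one table step of B: fold the inner classificacao match into a single Boolean test
theorem pvStep (o : Option (List (String × String))) (acc : List String) (t : String) :
    (match o with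
     | some cls =>
       if (PySem.Dict.mk cls).getD "nivel" "" ∈ (["MAIS", "MUITO_MAIS"] : List String)
       then acc ++ [t] else acc
     | none => acc)
    = (if (match o with
           | some cls =>
             decide ((PySem.Dict.mk cls).getD "nivel" "" = "MAIS") ||
               decide ((PySem.Dict.mk cls).getD "nivel" "" = "MUITO_MAIS")
           | none => false) = true
       then acc ++ [t] else acc) := by
  cases o with
  | none => simp
  | some cls => simp [List.mem_cons]

-- B's per-key test equals membership of the key in A's high list, given unique keys
theorem pvCond_eq (q : List (String × List (String × List (String × String))))
    (hnd : (q.map Prod.fst).Nodup) (K : String) :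
    (match (PySem.Dict.mk q).get? K with
     | some dadosL => pvAlto dadosL
     | none => false)
    = ((q.filter (fun p => pvAlto p.2)).map Prod.fst).contains K := by
  have hkeys : (PySem.Dict.mk q).keys.Nodup := by
    simpa [PySem.Dict.keys] using hnd
  have hiff : ∀ d, (PySem.Dict.mk q).get? K = some d ↔ (K, d) ∈ q := fun d =>
    PySem.Dict.get?_eq_some_iff_mem_items (PySem.Dict.mk q) K d hkeys
  have hcon : (((q.filter (fun p => pvAlto p.2)).map Prod.fst).contains K = true)
      ↔ ∃ d, (K, d) ∈ q ∧ pvAlto d = true := by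
    simp only [List.contains_eq_mem, decide_eq_true_eq, List.mem_map, List.mem_filter]
    constructor
    · rintro ⟨⟨k, d⟩, ⟨hp, ha⟩, hk⟩
      simp only at hk
      subst hk
      exact ⟨d, hp, ha⟩
    · rintro ⟨d, hd, ha⟩
      exact ⟨(K, d), ⟨hd, ha⟩, rfl⟩
  rw [Bool.eq_iff_iff, hcon]
  cases h : (PySem.Dict.mk q).get? K with
  | none =>
    simp only [Bool.false_eq_true, false_iff]
    rintro ⟨d, hd, _⟩
    have := (hiff d).2 hd
    rw [h] at this
    cases this
  | some dadosL =>
    constructor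
    · intro ha
      exact ⟨dadosL, (hiff dadosL).1 h, ha⟩
    · rintro ⟨d, hd, ha⟩
      have := (hiff d).2 hd
      rw [h] at this
      injection this with hd2
      rw [hd2]
      exact ha

-- ===== VERDICT (by name: the statement is the Claim_ definition above) =====
theorem interpretar_perfil_sensorial_geral_py_spec : Claim_equal_interpretar_perfil_sensorial_geral_py := by
  intro q _ hpre
  unfold Spec_interpretar_perfil_sensorial_geral_py
  unfold interpretar_perfil_sensorial_geral_py interpretar_perfil_sensorial_geral_py_alt
  have hfun : (fun (acc : List String) (kt : String × String) =>
        match (PySem.Dict.mk q).get? kt.1 with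
        | some dadosL =>
          match (PySem.Dict.mk dadosL).get? "classificacao" with
          | some cls =>
            if (PySem.Dict.mk cls).getD "nivel" "" ∈ (["MAIS", "MUITO_MAIS"] : List String)
            then acc ++ [kt.2] else acc
          | none => acc
        | none => acc)
      = (fun (acc : List String) (kt : String × String) =>
          if ((q.filter (fun p => pvAlto p.2)).map Prod.fst).contains kt.1
          then acc ++ [kt.2] else acc) := by
    funext acc kt
    rw [← pvCond_eq q hpre kt.1]
    cases h : (PySem.Dict.mk q).get? kt.1 with
    | none => simp
    | some dadosL =>
      simp only [pvAlto]
      exact pvStep ((PySem.Dict.mk dadosL).get? "classificacao") acc kt.2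
  simp only [pvTabela]
  rw [pvFoldA_fst, hfun]
  rfl
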